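-- pv_equiv track=rewrite | github.com/pypi-data/pypi-mirror-404 | packages/vibedna/vibedna-1.0.0.tar.gz/vibedna-1.0.0/vibedna/agents/mcp_servers/synth_server.py | _break_homopolymers
-- ===== SOURCE A (Python) =====
-- def _break_homopolymers(sequence: str, max_run: int) -> str:
--     """Break homopolymer runs by inserting synonymous changes."""
--     result = list(sequence)
--     complement = {'A': 'T', 'T': 'A', 'G': 'C', 'C': 'G'}
--
--     i = 0
--     while i < len(result):
--         run_start = i
--         while i < len(result) and result[i] == result[run_start]:
--             i += 1
--         run_length = i - run_start
--
--         if run_length > max_run: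
--             # Insert breaks at regular intervals
--             for j in range(run_start + max_run, i, max_run):
--                 if j < len(result):
--                     # Use complement to break the run
--                     result[j] = complement[result[j]]
--
--     return ''.join(result)
-- ===== SOURCE B (Python) =====
-- def _break_homopolymers(sequence: str, max_run: int) -> str:
--     """Break homopolymer runs by inserting synonymous changes."""
--     complement = {'A': 'T', 'T': 'A', 'G': 'C', 'C': 'G'}
--
--     def emit(run):
--         # flip every max_run-th character inside the run to its complement
--         for k in range(max_run, len(run), max_run):
--             run[k] = complement[run[0]]
--         return run
--
--     out = []
--     run = []
--     for ch in sequence: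
--         if run and ch != run[0]:
--             out += emit(run)
--             run = []
--         run.append(ch)
--     if run:
--         out += emit(run)
--     return ''.join(out)
-- ===== Notes on version B (the rewrite author's own statement) =====
-- stated objective: alternative
-- what changed: Replaces A's index-arithmetic double-while over one mutable array (absolute run_start/i bookkeeping and in-place flips at absolute indices) by a single pass that buffers each homopolymer run in its own list, flips local indices range(max_run, len(run), max_run) inside the buffer, and concatenates the emitted runs.
import Mathlib
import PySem

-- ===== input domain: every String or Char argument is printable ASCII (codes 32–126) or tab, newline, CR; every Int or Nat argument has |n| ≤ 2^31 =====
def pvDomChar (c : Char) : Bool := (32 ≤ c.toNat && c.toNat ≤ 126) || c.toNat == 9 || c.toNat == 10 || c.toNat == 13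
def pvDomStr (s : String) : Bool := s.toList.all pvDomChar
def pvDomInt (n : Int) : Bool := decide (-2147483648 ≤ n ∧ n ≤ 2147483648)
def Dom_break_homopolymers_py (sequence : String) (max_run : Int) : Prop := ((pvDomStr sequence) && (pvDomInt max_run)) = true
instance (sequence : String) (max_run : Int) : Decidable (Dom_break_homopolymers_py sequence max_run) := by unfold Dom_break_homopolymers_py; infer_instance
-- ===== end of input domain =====

-- B buffers each homopolymer run in its own list and flips local indices, instead of A's
-- absolute-index double-while over one mutable array; equivalence of return values is proved
-- on exactly the inputs where the Python A returns (Pre_). Objective: alternative decomposition.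

-- ===== PORT A =====
-- complement[c]; total (Pre_ excludes the inputs where Python's dict lookup raises KeyError)
def pvComp (c : Char) : Char :=
  if c = 'A' then 'T' else if c = 'T' then 'A'
  else if c = 'G' then 'C' else if c = 'C' then 'G' else c

-- inner while: advance i while result[i] == result[run_start]
def aScan (result : List Char) (rs i : Nat) : Nat :=
  if h : i < result.length ∧ result[i]? = result[rs]? then aScan result rs (i + 1) else i
termination_by result.length - i
decreasing_by omega

-- body of the for-j loop: if j < len(result): result[j] = complement[result[j]]
def aFlipStep (r : List Char) (j : Int) : List Char :=
  if j < (r.length : Int) then r.set j.toNat (pvComp (r.getD j.toNat ' ')) else r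

-- the `if run_length > max_run: for j in range(run_start + max_run, i, max_run) …` block
def aFlips (l : List Char) (i i2 : Nat) (m : Int) : List Char :=
  if ((i2 : Int) - (i : Int)) > m
  then (PySem.List.pyRange ((i : Int) + m) (i2 : Int) m).foldl aFlipStep l
  else l

theorem aFlipStep_length (r : List Char) (j : Int) : (aFlipStep r j).length = r.length := by
  unfold aFlipStep; split <;> simp

theorem foldl_aFlipStep_length (js : List Int) :
    ∀ (r : List Char), (js.foldl aFlipStep r).length = r.length := by
  induction js with
  | nil => intro r; rfl
  | cons j js ih => intro r; rw [List.foldl_cons, ih, aFlipStep_length]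

theorem aFlips_length (l : List Char) (i i2 : Nat) (m : Int) :
    (aFlips l i i2 m).length = l.length := by
  unfold aFlips; split <;> simp [foldl_aFlipStep_length]

theorem aScan_ge (result : List Char) (rs : Nat) : ∀ i, i ≤ aScan result rs i := by
  intro i
  fun_induction aScan with
  | case1 i h ih => omega
  | case2 i h => omega

-- outer while; first inner-while test at i = run_start is always true, hence aScan starts at i+1
def aLoop (result : List Char) (i : Nat) (m : Int) : List Char :=
  if h : i < result.length then
    aLoop (aFlips result i (aScan result i (i + 1)) m) (aScan result i (i + 1)) m
  else result
termination_by result.length - i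
decreasing_by
  have h1 := aScan_ge result i (i + 1)
  rw [aFlips_length]; omega

def break_homopolymers_py (sequence : String) (max_run : Int) : String :=
  String.ofList (aLoop sequence.toList 0 max_run)

-- ===== PORT B =====
-- emit(run): flip every max_run-th char of the buffered run to complement[run[0]]
def emitB (m : Int) (run : List Char) : List Char :=
  (PySem.List.pyRange m (run.length : Int) m).foldl
    (fun r k => r.set k.toNat (pvComp (r.getD 0 ' '))) run

-- loop body: flush the buffer when the character changes, else extend it
def bStep (m : Int) (st : List Char × List Char) (ch : Char) : List Char × List Char :=
  if st.2 ≠ [] ∧ st.2[0]? ≠ some ch then (st.1 ++ emitB m st.2, [ch])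
  else (st.1, st.2 ++ [ch])

def break_homopolymers_py_alt (sequence : String) (max_run : Int) : String :=
  let st := sequence.toList.foldl (bStep max_run) ([], [])
  String.ofList (st.1 ++ (if st.2 = [] then [] else emitB max_run st.2))

-- ===== PRECONDITION & SPEC =====
-- run decomposition of the input: list of (character, run length) of maximal constant runs
def runsOf : List Char → List (Char × Nat)
  | [] => []
  | c :: rest =>
    match runsOf rest with
    | (c', n) :: rs => if c = c' then (c, n + 1) :: rs else (c, 1) :: (c', n) :: rs
    | [] => [(c, 1)]

-- Pre_ excludes exactly the inputs where A raises: max_run = 0 with a nonempty sequence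
-- (range step 0, ValueError) and, for positive max_run, a run of a non-ATGC character longer
-- than max_run (complement dict lookup, KeyError).
def Pre_break_homopolymers_py (sequence : String) (max_run : Int) : Prop :=
  (max_run ≠ 0 ∨ sequence.toList = []) ∧
  (0 < max_run → ∀ p ∈ runsOf sequence.toList,
      (p.2 : Int) > max_run → p.1 ∈ (['A', 'T', 'G', 'C'] : List Char))

instance (sequence : String) (max_run : Int) : Decidable (Pre_break_homopolymers_py sequence max_run) := by
  unfold Pre_break_homopolymers_py; infer_instance

def pvWitness_break_homopolymers_py : String × Int := ("AAAATTC", 2)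

def Spec_break_homopolymers_py (sequence : String) (max_run : Int) (out : String) : Prop := out = break_homopolymers_py_alt sequence max_run
instance (sequence : String) (max_run : Int) (out : String) : Decidable (Spec_break_homopolymers_py sequence max_run out) := by unfold Spec_break_homopolymers_py; infer_instance

-- ===== CLAIM (what is proved, stated in full; the proofs are below) =====
def Claim_equal_break_homopolymers_py : Prop := ∀ (sequence : String) (max_run : Int), Dom_break_homopolymers_py sequence max_run → Pre_break_homopolymers_py sequence max_run → Spec_break_homopolymers_py sequence max_run (break_homopolymers_py sequence max_run)

-- ===== LEMMAS AND PROOFS =====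

-- run-by-run specification both ports are reduced to
def bSpec (m : Int) : List Char → List Char
  | [] => []
  | c :: t => emitB m (c :: t.takeWhile (· = c)) ++ bSpec m (t.dropWhile (· = c))
termination_by l => l.length
decreasing_by
  have := List.length_dropWhile_le (· = c) t
  simp; omega

theorem emitB_length (m : Int) (run : List Char) : (emitB m run).length = run.length := by
  unfold emitB
  generalize PySem.List.pyRange m (run.length : Int) m = js
  induction js generalizing run with
  | nil => rfl
  | cons j js ih => rw [List.foldl_cons, ih, List.length_set]

theorem pyRange_shift (x a b s : Int) (hs : 0 < s) :
    PySem.List.pyRange (x + a) (x + b) s = (PySem.List.pyRange a b s).map (fun j => x + j) := by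
  rw [PySem.List.pyRange_of_pos _ _ hs, PySem.List.pyRange_of_pos _ _ hs, List.map_map]
  have e1 : x + b - (x + a) = b - a := by ring
  have e2 : (x + a < x + b) ↔ (a < b) := by omega
  simp only [e1, e2]
  apply List.map_congr_left
  intro k _
  simp [Function.comp]; ring

theorem pyRange_pos_empty (a b s : Int) (hs : 0 < s) (hab : b ≤ a) :
    PySem.List.pyRange a b s = [] := by
  rw [PySem.List.pyRange_of_pos _ _ hs, if_neg (by omega)]
  simp

theorem pyRange_zero_step (a b : Int) : PySem.List.pyRange a b 0 = [] := by
  unfold PySem.List.pyRange; simp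

theorem pyRange_neg_empty (a b s : Int) (hs : s < 0) (hab : a ≤ b) :
    PySem.List.pyRange a b s = [] := by
  unfold PySem.List.pyRange
  have h0 : ¬ s = 0 := by omega
  have h1 : ¬ 0 < s := by omega
  have h2 : ¬ b < a := by omega
  simp [h0, h1, h2]

theorem nodup_pyRange_pos (a b s : Int) (hs : 0 < s) : (PySem.List.pyRange a b s).Nodup := by
  rw [PySem.List.pyRange_of_pos _ _ hs]
  refine List.Nodup.map ?_ (List.nodup_range)
  intro k1 k2 h
  have h2 : s * (k1 : Int) = s * k2 := by
    have := add_left_cancel h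
    exact this
  have := mul_left_cancel₀ (by omega : (s : Int) ≠ 0) h2
  exact_mod_cast this

-- core correspondence: A's absolute-index flips over pre ++ run ++ post are B's local flips on run
theorem flip_corr (js : List Int) :
    ∀ (pre run post : List Char) (c : Char),
      (∀ j ∈ js, 1 ≤ j ∧ j < (run.length : Int)) → js.Nodup →
      (∀ j ∈ js, run[j.toNat]? = some c) → run[0]? = some c →
      (js.map (fun j => (pre.length : Int) + j)).foldl aFlipStep (pre ++ (run ++ post))
        = pre ++ (js.foldl (fun r k => r.set k.toNat (pvComp (r.getD 0 ' '))) run ++ post) := by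
  induction js with
  | nil => intro pre run post c _ _ _ _; rfl
  | cons j js ih =>
    intro pre run post c hb hnd hmem h0
    obtain ⟨hj1, hjlt⟩ := hb j (by simp)
    have hjn : j.toNat < run.length := by omega
    have hact : aFlipStep (pre ++ (run ++ post)) ((pre.length : Int) + j)
        = pre ++ (run.set j.toNat (pvComp c) ++ post) := by
      unfold aFlipStep
      rw [if_pos (by rw [List.length_append, List.length_append]; push_cast; omega)]
      have htn : ((pre.length : Int) + j).toNat = pre.length + j.toNat := by omega
      rw [htn]
      have hget : (pre ++ (run ++ post))[pre.length + j.toNat]? = run[j.toNat]? := by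
        rw [List.getElem?_append_right (by omega)]
        simp [List.getElem?_append_left hjn]
      have hgetD : (pre ++ (run ++ post)).getD (pre.length + j.toNat) ' ' = c := by
        rw [List.getD_eq_getElem?_getD, hget, hmem j (by simp)]; rfl
      rw [hgetD, List.set_append_right _ _ (by omega),
          show pre.length + j.toNat - pre.length = j.toNat by omega,
          List.set_append_left _ _ hjn]
    have hstep : (run.set j.toNat (pvComp (run.getD 0 ' '))) = run.set j.toNat (pvComp c) := by
      rw [List.getD_eq_getElem?_getD, h0]; rfl
    rw [List.map_cons, List.foldl_cons, List.foldl_cons, hact, hstep]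
    apply ih pre (run.set j.toNat (pvComp c)) post c
    · intro j' hj'; have := hb j' (by simp [hj']); simpa using this
    · exact hnd.of_cons
    · intro j' hj'
      have hne : j.toNat ≠ j'.toNat := by
        intro he
        have h1' := (hb j' (by simp [hj'])).1
        have : j = j' := by omega
        exact (List.nodup_cons.mp hnd).1 (this ▸ hj')
      rw [List.getElem?_set_ne hne]
      exact hmem j' (by simp [hj'])
    · rw [List.getElem?_set_ne (by omega)]; exact h0

-- one outer iteration rewrites the current run block into emitB of it, in every max_run case
theorem replicate_getElem? (n k : Nat) (c : Char) (hk : k < n) :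
    (List.replicate n c)[k]? = some c := by
  rw [List.getElem?_eq_getElem (by simpa using hk)]
  simp

theorem aFlips_eq_emitB (m : Int) (pre post : List Char) (c : Char) (n : Nat) (hn : 0 < n) :
    aFlips (pre ++ (List.replicate n c ++ post)) pre.length (pre.length + n) m
      = pre ++ (emitB m (List.replicate n c) ++ post) := by
  have hlen : ((List.replicate n c).length : Int) = (n : Int) := by simp
  unfold aFlips emitB
  rcases lt_trichotomy m 0 with hm | hm | hm
  · -- negative step: both ranges empty
    rw [if_pos (by push_cast; omega)]
    rw [pyRange_neg_empty _ _ _ hm (by push_cast; omega),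
        pyRange_neg_empty _ _ _ hm (by rw [hlen]; omega)]
    rfl
  · -- zero step: both ranges empty
    subst hm
    rw [if_pos (by push_cast; omega)]
    rw [pyRange_zero_step, pyRange_zero_step]
    rfl
  · by_cases hnm : (n : Int) > m
    · -- flips happen; relate the two ranges by a shift
      rw [if_pos (by push_cast; omega)]
      have hsh : ((pre.length + n : Nat) : Int) = (pre.length : Int) + (n : Int) := by push_cast; ring
      rw [hsh, pyRange_shift _ _ _ _ hm, hlen]
      apply flip_corr
      · intro j hj
        have := (PySem.List.mem_pyRange_iff_of_pos hm j).mp hj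
        omega
      · exact nodup_pyRange_pos _ _ _ hm
      · intro j hj
        have := (PySem.List.mem_pyRange_iff_of_pos hm j).mp hj
        exact replicate_getElem? _ _ _ (by omega)
      · exact replicate_getElem? _ _ _ hn
    · -- run not longer than max_run: no flip on either side
      rw [if_neg (by push_cast; omega)]
      rw [hlen, pyRange_pos_empty _ _ _ hm (by omega)]
      rfl

theorem aScan_spec (l : List Char) (rs : Nat) (c : Char) (hrs : l[rs]? = some c) :
    ∀ (run rest : List Char) (i : Nat), l.drop i = run ++ rest →
      (∀ x ∈ run, x = c) → (∀ y, rest.head? = some y → ¬ y = c) →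
      aScan l rs i = i + run.length := by
  intro run
  induction run with
  | nil =>
    intro rest i hdrop _ hrest
    simp only [List.nil_append] at hdrop
    have hgi : l[i]? = rest.head? := by
      rw [← hdrop, List.head?_eq_getElem?, List.getElem?_drop]; simp
    rw [aScan, dif_neg]
    · simp
    · rintro ⟨hlt, heq⟩
      rw [hrs, hgi] at heq
      cases hh : rest.head? with
      | none => rw [hh] at heq; simp at heq
      | some y => exact hrest y hh (by rw [hh] at heq; simpa using heq)
  | cons x run ih =>
    intro rest i hdrop hrun hrest
    have hx : x = c := hrun x (by simp)
    have hgi : l[i]? = some c := by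
      have : l[i]? = (l.drop i)[0]? := by rw [List.getElem?_drop]; simp
      rw [this, hdrop]; simp [hx]
    have hlt : i < l.length := (List.getElem?_eq_some_iff.mp hgi).1
    rw [aScan, dif_pos ⟨hlt, by rw [hgi, hrs]⟩]
    have hdrop' : l.drop (i + 1) = run ++ rest := by
      rw [List.drop_add_one_eq_tail_drop, hdrop]
      simp
    rw [ih rest (i + 1) hdrop' (fun y hy => hrun y (by simp [hy])) hrest]
    simp; omega

theorem aLoop_spec_aux (m : Int) : ∀ (N : Nat) (rest pre : List Char), rest.length ≤ N →
    aLoop (pre ++ rest) pre.length m = pre ++ bSpec m rest := by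
  intro N
  induction N with
  | zero =>
    intro rest pre hle
    have : rest = [] := List.eq_nil_of_length_eq_zero (by omega)
    subst this
    rw [aLoop, dif_neg (by simp), bSpec]
  | succ N ih =>
    intro rest pre hle
    cases rest with
    | nil => rw [aLoop, dif_neg (by simp), bSpec]
    | cons c t =>
      have hlt : pre.length < (pre ++ c :: t).length := by simp
      rw [aLoop, dif_pos hlt]
      -- the scan finds the maximal run c :: takeWhile (· = c) t
      have hdropt : (pre ++ c :: t).drop (pre.length + 1)
          = t.takeWhile (· = c) ++ t.dropWhile (· = c) := by
        rw [List.drop_add_one_eq_tail_drop, List.drop_left]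
        simp
      have hscan : aScan (pre ++ c :: t) pre.length (pre.length + 1)
          = (pre.length + 1) + (t.takeWhile (· = c)).length := by
        apply aScan_spec _ _ c
        · rw [List.getElem?_append_right (by omega)]
          simp
        · exact hdropt
        · intro x hx
          simpa using List.mem_takeWhile_imp hx
        · intro y hy hyc
          have := List.head?_dropWhile_not (· = c) t
          rw [hy] at this
          simp [hyc] at this
      -- rewrite the run as a replicate block
      have hrun : c :: t.takeWhile (· = c) = List.replicate ((t.takeWhile (· = c)).length + 1) c := by
        have : ∀ x ∈ c :: t.takeWhile (· = c), x = c := by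
          intro x hx
          rcases List.mem_cons.mp hx with h | h
          · exact h
          · simpa using List.mem_takeWhile_imp h
        have h2 := List.eq_replicate_of_mem this
        simpa using h2
      have hsplit : (c :: t) = List.replicate ((t.takeWhile (· = c)).length + 1) c
          ++ t.dropWhile (· = c) := by
        conv_lhs => rw [show (c :: t) = c :: (t.takeWhile (· = c) ++ t.dropWhile (· = c)) by
          rw [List.takeWhile_append_dropWhile]]
        rw [← List.cons_append, hrun]
      set n := (t.takeWhile (· = c)).length + 1 with hn
      have hscan' : aScan (pre ++ c :: t) pre.length (pre.length + 1) = pre.length + n := by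
        rw [hscan]; omega
      rw [hscan']
      conv_lhs => rw [hsplit]
      rw [aFlips_eq_emitB m pre (t.dropWhile (· = c)) c n (by omega)]
      have hplen : (pre ++ emitB m (List.replicate n c)).length = pre.length + n := by
        rw [List.length_append, emitB_length, List.length_replicate]
      rw [← List.append_assoc, ← hplen]
      have hdw : (t.dropWhile (· = c)).length ≤ N := by
        have := List.length_dropWhile_le (· = c) t
        simp at hle
        omega
      rw [ih (t.dropWhile (· = c)) (pre ++ emitB m (List.replicate n c)) hdw]
      conv_rhs => rw [show bSpec m (c :: t) = emitB m (c :: t.takeWhile (· = c)) ++ bSpec m (t.dropWhile (· = c)) from by rw [bSpec]]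
      rw [hrun]
      simp [List.append_assoc]

-- B's fold invariant: a nonempty constant buffer, then the rest of the input
theorem bFold_spec (m : Int) : ∀ (t : List Char) (out : List Char) (c : Char) (n : Nat), 0 < n →
    (t.foldl (bStep m) (out, List.replicate n c)).1
      ++ (if (t.foldl (bStep m) (out, List.replicate n c)).2 = [] then []
          else emitB m (t.foldl (bStep m) (out, List.replicate n c)).2)
      = out ++ (emitB m (List.replicate n c ++ t.takeWhile (· = c))
          ++ bSpec m (t.dropWhile (· = c))) := by
  intro t
  induction t with
  | nil =>
    intro out c n hn
    rw [List.foldl_nil]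
    simp only [List.takeWhile_nil, List.dropWhile_nil, List.append_nil, bSpec]
    rw [if_neg (by simp; omega)]
  | cons x t ih =>
    intro out c n hn
    rw [List.foldl_cons]
    by_cases hx : x = c
    · subst hx
      have hstep : bStep m (out, List.replicate n x) x = (out, List.replicate (n + 1) x) := by
        unfold bStep
        rw [if_neg]
        · simp [List.replicate_succ']
        · intro h
          have := h.2
          rcases n with _ | n'
          · omega
          · simp [List.replicate_succ] at this
      rw [hstep, ih out x (n + 1) (by omega)]
      rw [List.takeWhile_cons_of_pos (by simp), List.dropWhile_cons_of_pos (by simp)]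
      rw [show List.replicate n x ++ x :: t.takeWhile (· = x)
            = List.replicate (n + 1) x ++ t.takeWhile (· = x) by
          rw [List.replicate_succ']; simp]
    · have hstep : bStep m (out, List.replicate n c) x
          = (out ++ emitB m (List.replicate n c), [x]) := by
        unfold bStep
        rw [if_pos]
        constructor
        · simp; omega
        · rcases n with _ | n'
          · omega
          · simp [List.replicate_succ]
            intro he
            exact hx (he.symm)
      rw [hstep, show ([x] : List Char) = List.replicate 1 x from rfl,
          ih (out ++ emitB m (List.replicate n c)) x 1 (by omega)]
      rw [List.takeWhile_cons_of_neg (by simp [hx]), List.dropWhile_cons_of_neg (by simp [hx])]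
      rw [bSpec]
      simp [List.append_assoc]

-- ===== VERDICT (by name: the statement is the Claim_ definition above) =====
theorem break_homopolymers_py_spec : Claim_equal_break_homopolymers_py := by
  intro sequence max_run _ _
  unfold Spec_break_homopolymers_py break_homopolymers_py break_homopolymers_py_alt
  have hA : aLoop sequence.toList 0 max_run = bSpec max_run sequence.toList := by
    have := aLoop_spec_aux max_run sequence.toList.length sequence.toList [] (le_refl _)
    simpa using this
  rw [hA]
  cases hl : sequence.toList with
  | nil => simp [bSpec]
  | cons c t =>
    rw [List.foldl_cons]
    have hstep : bStep max_run (([] : List Char), ([] : List Char)) c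
        = ([], List.replicate 1 c) := by
      unfold bStep; simp
    rw [hstep]
    have := bFold_spec max_run t [] c 1 (by omega)
    simp only at this
    rw [bSpec]
    congr 1
    rw [this]
    simp
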